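-- pv_equiv track=rewrite | github.com/hishamnasrallah/django_generator | generator/generators/api/serializer_generator.py | _get_custom_serializers
-- ===== SOURCE A (Python) =====
-- from typing import Dict, Any, List, Optional, Set
--
-- def _get_custom_serializers(app: Dict[str, Any]) -> List[Dict[str, Any]]:
--     """Get custom serializer definitions from app config."""
--     custom_serializers = []
--
--     if not app:
--         return custom_serializers
--
--     # Check for API-specific serializers
--     api_config = app.get('api', {})
--     if not api_config:
--         return custom_serializers
--
--     # List serializers
--     list_serializers = api_config.get('list_serializers', [])
--     if list_serializers:
--         for model_name in list_serializers:
--             custom_serializers.append({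
--                 'name': f"{model_name}ListSerializer",
--                 'type': 'list',
--                 'model': model_name,
--             })
--
--     # Detail serializers
--     detail_serializers = api_config.get('detail_serializers', [])
--     if detail_serializers:
--         for model_name in detail_serializers:
--             custom_serializers.append({
--                 'name': f"{model_name}DetailSerializer",
--                 'type': 'detail',
--                 'model': model_name,
--             })
--
--     # Create/Update serializers
--     write_serializers = api_config.get('write_serializers', [])
--     if write_serializers:
--         for model_name in write_serializers:
--             custom_serializers.append({
--                 'name': f"{model_name}WriteSerializer",
--                 'type': 'write',
--                 'model': model_name,
--             })
--
--     return custom_serializers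
-- ===== SOURCE B (Python) =====
-- from typing import Dict, Any, List
--
-- def _rows(models: List[str], suffix: str, typ: str, tail: List[Dict[str, Any]]) -> List[Dict[str, Any]]:
--     """Recursively cons a serializer dict per model onto an explicitly passed tail."""
--     if not models:
--         return tail
--     m = models[0]
--     return [{'name': m + suffix, 'type': typ, 'model': m}] + _rows(models[1:], suffix, typ, tail)
--
-- def _get_custom_serializers(app: Dict[str, Any]) -> List[Dict[str, Any]]:
--     """Get custom serializer definitions from app config (recursive, tail-threaded)."""
--     if not app:
--         return []
--     api_config = app.get('api', {})
--     if not api_config: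
--         return []
--     return _rows(api_config.get('list_serializers', []), 'ListSerializer', 'list',
--            _rows(api_config.get('detail_serializers', []), 'DetailSerializer', 'detail',
--            _rows(api_config.get('write_serializers', []), 'WriteSerializer', 'write', [])))
-- ===== Notes on version B (the rewrite author's own statement) =====
-- stated objective: alternative
-- what changed: Replaces A's three unrolled append-to-accumulator loops with a single recursive helper that conses one row per model onto an explicitly threaded tail, nesting the three calls so the list is built back-to-front (write innermost, list outermost).
import Mathlib
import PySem

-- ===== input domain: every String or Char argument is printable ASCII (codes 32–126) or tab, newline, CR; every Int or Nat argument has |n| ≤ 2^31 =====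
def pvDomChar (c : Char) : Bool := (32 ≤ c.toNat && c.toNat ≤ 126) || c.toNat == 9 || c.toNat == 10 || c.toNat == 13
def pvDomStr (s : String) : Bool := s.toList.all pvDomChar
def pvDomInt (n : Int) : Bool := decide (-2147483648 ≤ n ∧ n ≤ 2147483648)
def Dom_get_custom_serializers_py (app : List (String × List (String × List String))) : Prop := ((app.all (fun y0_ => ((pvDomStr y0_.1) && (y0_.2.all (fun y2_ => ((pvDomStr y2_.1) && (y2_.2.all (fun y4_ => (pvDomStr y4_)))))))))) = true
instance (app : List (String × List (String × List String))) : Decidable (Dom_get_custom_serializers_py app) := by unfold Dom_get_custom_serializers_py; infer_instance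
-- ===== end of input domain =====

-- B replaces A's three unrolled append-to-accumulator loops with one recursive helper
-- consing rows onto an explicitly threaded tail (objective: alternative decomposition).

-- dict.get(k, dflt) on an association list: first match, else the default (exact for Python dicts, whose keys are unique).
def pvGetD {β : Type} (d : List (String × β)) (k : String) (dflt : β) : β :=
  match d.find? (fun p => p.1 == k) with
  | some p => p.2
  | none => dflt

-- ===== PORT A =====
def get_custom_serializers_py (app : List (String × List (String × List String))) : List (List (String × String)) :=
  -- custom_serializers = []
  let cs0 : List (List (String × String)) := []
  -- if not app: return custom_serializers
  if app = [] then cs0 else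
  -- api_config = app.get('api', {}); if not api_config: return custom_serializers
  let api_config := pvGetD app "api" []
  if api_config = [] then cs0 else
  -- list serializers block
  let list_serializers := pvGetD api_config "list_serializers" []
  let cs1 := if list_serializers ≠ [] then
      list_serializers.foldl (fun acc m =>
        acc ++ [[("name", m ++ "ListSerializer"), ("type", "list"), ("model", m)]]) cs0
    else cs0
  -- detail serializers block
  let detail_serializers := pvGetD api_config "detail_serializers" []
  let cs2 := if detail_serializers ≠ [] then
      detail_serializers.foldl (fun acc m =>
        acc ++ [[("name", m ++ "DetailSerializer"), ("type", "detail"), ("model", m)]]) cs1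
    else cs1
  -- write serializers block
  let write_serializers := pvGetD api_config "write_serializers" []
  let cs3 := if write_serializers ≠ [] then
      write_serializers.foldl (fun acc m =>
        acc ++ [[("name", m ++ "WriteSerializer"), ("type", "write"), ("model", m)]]) cs2
    else cs2
  cs3

-- ===== PORT B =====
-- _rows: recursively cons one serializer dict per model onto the threaded tail
def pvRows (models : List String) (suffix typ : String) (tail : List (List (String × String))) : List (List (String × String)) :=
  match models with
  | [] => tail
  | m :: ms => [("name", m ++ suffix), ("type", typ), ("model", m)] :: pvRows ms suffix typ tail

def get_custom_serializers_py_alt (app : List (String × List (String × List String))) : List (List (String × String)) :=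
  if app = [] then [] else
  let api_config := pvGetD app "api" []
  if api_config = [] then [] else
  pvRows (pvGetD api_config "list_serializers" []) "ListSerializer" "list"
    (pvRows (pvGetD api_config "detail_serializers" []) "DetailSerializer" "detail"
      (pvRows (pvGetD api_config "write_serializers" []) "WriteSerializer" "write" []))

-- ===== PRECONDITION & SPEC =====
def Spec_get_custom_serializers_py (app : List (String × List (String × List String))) (out : List (List (String × String))) : Prop := out = get_custom_serializers_py_alt app
instance (app : List (String × List (String × List String))) (out : List (List (String × String))) : Decidable (Spec_get_custom_serializers_py app out) := by unfold Spec_get_custom_serializers_py; infer_instance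

-- ===== CLAIM (what is proved, stated in full; the proofs are below) =====
def Claim_equal_get_custom_serializers_py : Prop := ∀ (app : List (String × List (String × List String))), Dom_get_custom_serializers_py app → Spec_get_custom_serializers_py app (get_custom_serializers_py app)

-- ===== LEMMAS AND PROOFS =====

-- B's recursive helper equals a map of rows followed by the threaded tail
theorem pvRows_eq_map (models : List String) (suffix typ : String) (tail : List (List (String × String))) :
    pvRows models suffix typ tail
      = models.map (fun m => [("name", m ++ suffix), ("type", typ), ("model", m)]) ++ tail := by
  induction models with
  | nil => rfl
  | cons m ms ih => simp [pvRows, ih]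

theorem pv_flatten_map_singleton {α β : Type} (f : α → β) (l : List α) :
    (l.map (fun x => [f x])).flatten = l.map f := by
  induction l with
  | nil => rfl
  | cons x xs ih => simp [ih]

-- ===== VERDICT (by name: the statement is the Claim_ definition above) =====
theorem get_custom_serializers_py_spec : Claim_equal_get_custom_serializers_py := by
  intro app _
  unfold Spec_get_custom_serializers_py
  unfold get_custom_serializers_py get_custom_serializers_py_alt
  by_cases h0 : app = []
  · simp [h0]
  · rw [if_neg h0, if_neg h0]
    by_cases h1 : pvGetD app "api" ([] : List (String × List String)) = []
    · simp [h1]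
    · rw [if_neg h1, if_neg h1]
      by_cases hl : pvGetD (pvGetD app "api" []) "list_serializers" [] = [] <;>
      by_cases hd : pvGetD (pvGetD app "api" []) "detail_serializers" [] = [] <;>
      by_cases hw : pvGetD (pvGetD app "api" []) "write_serializers" [] = [] <;>
        simp [hl, hd, hw, pvRows_eq_map, pv_flatten_map_singleton]
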